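-- pv_equiv track=rewrite | github.com/ammaarahmad1999/CS571_LAB | LAB1/bfs_h2.py | reverse_hash
-- ===== SOURCE A (Python) =====
-- def reverse_hash(value):
-- 	arr = []
-- 	cnt = 9
-- 	while (cnt):
-- 		arr.append(value%9)
-- 		value = value//9
-- 		cnt -= 1
--
-- 	return arr
-- ===== SOURCE B (Python) =====
-- def reverse_hash(value):
-- 	return [value // 9**i % 9 for i in range(9)]
-- ===== Notes on version B (the rewrite author's own statement) =====
-- stated objective: idiomatic
-- what changed: Replaces the stateful append-and-divide loop (threading a mutated value through nine successive floor divisions) with a per-digit comprehension computing each base-9 digit independently as value // 9**i % 9.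
import Mathlib
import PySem

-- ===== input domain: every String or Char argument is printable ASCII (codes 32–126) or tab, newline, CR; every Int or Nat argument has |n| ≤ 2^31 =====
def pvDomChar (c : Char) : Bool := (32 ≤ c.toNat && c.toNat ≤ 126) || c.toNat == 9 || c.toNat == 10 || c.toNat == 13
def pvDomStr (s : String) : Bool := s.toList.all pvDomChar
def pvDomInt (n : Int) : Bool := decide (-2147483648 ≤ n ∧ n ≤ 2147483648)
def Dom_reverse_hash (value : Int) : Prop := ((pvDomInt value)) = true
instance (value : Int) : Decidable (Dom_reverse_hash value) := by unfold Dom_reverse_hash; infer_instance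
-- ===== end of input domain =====

-- B replaces A's stateful divide-and-append loop with an independent per-digit formula (value // 9**i % 9) over range(9); idiomatic decomposition, same cost.


-- ===== PORT A =====
-- while (cnt): arr.append(value%9); value = value//9; cnt -= 1
def reverseHashLoop : Nat → Int → List Int → List Int
  | 0, _, arr => arr
  | cnt + 1, value, arr =>
      reverseHashLoop cnt (PySem.Int.floordiv value 9) (arr ++ [PySem.Int.mod value 9])

def reverse_hash (value : Int) : List Int :=
  reverseHashLoop 9 value []

-- ===== PORT B =====
-- [value // 9**i % 9 for i in range(9)]
def reverse_hash_alt (value : Int) : List Int :=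
  (PySem.List.pyRange 0 9 1).map
    (fun i => PySem.Int.mod (PySem.Int.floordiv value ((9 : Int) ^ i.toNat)) 9)

-- ===== PRECONDITION & SPEC =====
def Spec_reverse_hash (value : Int) (out : List Int) : Prop := out = reverse_hash_alt value
instance (value : Int) (out : List Int) : Decidable (Spec_reverse_hash value out) := by unfold Spec_reverse_hash; infer_instance

-- ===== CLAIM (what is proved, stated in full; the proofs are below) =====
def Claim_equal_reverse_hash : Prop := ∀ (value : Int), Dom_reverse_hash value → Spec_reverse_hash value (reverse_hash value)

-- ===== LEMMAS AND PROOFS =====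

theorem reverse_hash_eq_alt (value : Int) : reverse_hash value = reverse_hash_alt value := by
  simp only [reverse_hash, reverseHashLoop, reverse_hash_alt]
  rw [show (PySem.List.pyRange 0 9 1) = [0,1,2,3,4,5,6,7,8] from by decide]
  simp only [List.map, List.nil_append, List.cons_append]
  norm_num
  simp [Int.ediv_ediv_of_nonneg]

-- ===== VERDICT (by name: the statement is the Claim_ definition above) =====
theorem reverse_hash_spec : Claim_equal_reverse_hash := by
  intro value _
  exact reverse_hash_eq_alt value
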